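-- pv_equiv track=rewrite | github.com/e-vergo/TDCSG | scripts/find_iet.py | generate_words
-- ===== SOURCE A (Python) =====
-- from typing import List, Tuple, Dict, Optional
--
-- def generate_words(n: int, max_depth: int, alternating: bool = True) -> List[List[Tuple[str, int]]]:
--     """Generate group words up to given depth."""
--     words = []
--     max_power = n // 2 + 1
--     powers = [p for p in range(-max_power, max_power + 1) if p != 0]
--
--     def extend(word: List[Tuple[str, int]], depth: int):
--         if depth == 0:
--             if word:
--                 words.append(word)
--             return
--
--         # Determine which generators to try
--         if alternating and word:
--             last_gen = word[-1][0]
--             gens = ['b'] if last_gen == 'a' else ['a']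
--         else:
--             gens = ['a', 'b']
--
--         for gen in gens:
--             for power in powers:
--                 extend(word + [(gen, power)], depth - 1)
--
--     for depth in range(1, max_depth + 1):
--         for start_gen in ['a', 'b']:
--             for start_power in powers:
--                 extend([(start_gen, start_power)], depth - 1)
--
--     return words
-- ===== SOURCE B (Python) =====
-- def generate_words(n: int, max_depth: int, alternating: bool = True):
--     """Generate group words up to given depth (iterative level-by-level BFS)."""
--     max_power = n // 2 + 1
--     powers = [p for p in range(-max_power, max_power + 1) if p != 0]
--     words = []
--     level = [[]]
--     for _ in range(max_depth):
--         new_level = []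
--         for word in level:
--             if alternating and word:
--                 gens = ['b'] if word[-1][0] == 'a' else ['a']
--             else:
--                 gens = ['a', 'b']
--             for gen in gens:
--                 for power in powers:
--                     new_level.append(word + [(gen, power)])
--         words.extend(new_level)
--         level = new_level
--     return words
-- ===== Notes on version B (the rewrite author's own statement) =====
-- stated objective: alternative
-- what changed: Replaced the per-depth recursive DFS (which re-walks the whole tree from scratch for every target depth) by a single iterative breadth-first pass that keeps an explicit frontier of the previous level and extends it once per depth.
import Mathlib
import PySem

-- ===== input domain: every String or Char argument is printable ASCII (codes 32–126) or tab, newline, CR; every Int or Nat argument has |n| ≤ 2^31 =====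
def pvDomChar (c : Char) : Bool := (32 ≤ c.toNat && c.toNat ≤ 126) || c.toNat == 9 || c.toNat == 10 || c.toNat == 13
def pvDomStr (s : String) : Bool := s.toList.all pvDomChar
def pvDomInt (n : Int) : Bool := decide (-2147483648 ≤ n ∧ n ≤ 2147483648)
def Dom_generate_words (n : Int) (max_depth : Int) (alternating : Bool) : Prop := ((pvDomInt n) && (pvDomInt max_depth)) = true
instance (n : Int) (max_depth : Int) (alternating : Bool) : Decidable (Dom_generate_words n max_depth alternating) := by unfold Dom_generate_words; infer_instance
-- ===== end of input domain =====

-- B replaces A's per-depth recursive DFS re-walk by one iterative breadth-first pass keeping an explicit frontier (objective: alternative decomposition; same output order).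

-- ===== PORT A =====
-- shared helper: the gens-selection code, identical lines in A and B
-- ('gens = ['b'] if word[-1][0] == 'a' else ['a']' guarded by 'alternating and word')
def pvGens (alternating : Bool) (word : List (String × Int)) : List String :=
  if alternating && !word.isEmpty then
    if ((PySem.List.pyGet? word (-1)).getD ("", 0)).1 == "a" then ["b"] else ["a"]
  else ["a", "b"]

-- A's nested 'extend' in accumulator-passing form; 'depth' is the Nat fuel (A only calls it with depth ≥ 0)
def extendA (alternating : Bool) (powers : List Int) :
    List (String × Int) → Nat → List (List (String × Int)) → List (List (String × Int))
  | word, 0, words => if word.isEmpty then words else words ++ [word]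
  | word, depth+1, words =>
      (pvGens alternating word).foldl
        (fun ws gen =>
          powers.foldl
            (fun ws power => extendA alternating powers (word ++ [(gen, power)]) depth ws) ws)
        words

def generate_words (n : Int) (max_depth : Int) (alternating : Bool) : List (List (String × Int)) :=
  let max_power := PySem.Int.floordiv n 2 + 1
  let powers := (PySem.List.pyRange (-max_power) (max_power + 1) 1).filter (fun p => p != 0)
  (PySem.List.pyRange 1 (max_depth + 1) 1).foldl
    (fun words depth =>
      ["a", "b"].foldl
        (fun words start_gen =>
          powers.foldl
            (fun words start_power =>
              extendA alternating powers [(start_gen, start_power)] (depth - 1).toNat words)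
            words)
        words)
    []

-- ===== PORT B =====
def generate_words_alt (n : Int) (max_depth : Int) (alternating : Bool) : List (List (String × Int)) :=
  let max_power := PySem.Int.floordiv n 2 + 1
  let powers := (PySem.List.pyRange (-max_power) (max_power + 1) 1).filter (fun p => p != 0)
  ((PySem.List.pyRange 0 max_depth 1).foldl
    (fun (st : List (List (String × Int)) × List (List (String × Int))) _ =>
      let new_level := st.2.foldl
        (fun nl word =>
          (pvGens alternating word).foldl
            (fun nl gen =>
              powers.foldl (fun nl power => nl ++ [word ++ [(gen, power)]]) nl)
            nl)
        []
      (st.1 ++ new_level, new_level))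
    ([], [[]])).1

-- ===== PRECONDITION & SPEC =====
def Spec_generate_words (n : Int) (max_depth : Int) (alternating : Bool) (out : List (List (String × Int))) : Prop := out = generate_words_alt n max_depth alternating
instance (n : Int) (max_depth : Int) (alternating : Bool) (out : List (List (String × Int))) : Decidable (Spec_generate_words n max_depth alternating out) := by unfold Spec_generate_words; infer_instance

-- ===== CLAIM (what is proved, stated in full; the proofs are below) =====
def Claim_equal_generate_words : Prop := ∀ (n : Int) (max_depth : Int) (alternating : Bool), Dom_generate_words n max_depth alternating → Spec_generate_words n max_depth alternating (generate_words n max_depth alternating)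

-- ===== LEMMAS AND PROOFS =====

-- one extension step: all one-letter extensions of a word (B's inner two loops)
def pvStep (alternating : Bool) (powers : List Int) (w : List (String × Int)) :
    List (List (String × Int)) :=
  (pvGens alternating w).flatMap (fun gen => powers.map (fun power => w ++ [(gen, power)]))

-- the words A's 'extend' appends from word w with fuel d
def pvDesc (alternating : Bool) (powers : List Int) :
    Nat → List (String × Int) → List (List (String × Int))
  | 0, w => if w.isEmpty then [] else [w]
  | d+1, w => (pvGens alternating w).flatMap
      (fun gen => powers.flatMap (fun power => pvDesc alternating powers d (w ++ [(gen, power)])))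

-- d-fold frontier extension
def pvIter (alternating : Bool) (powers : List Int) :
    Nat → List (List (String × Int)) → List (List (String × Int))
  | 0, l => l
  | d+1, l => pvIter alternating powers d (l.flatMap (pvStep alternating powers))

-- B's frontier after k levels, and the accumulated output after k levels
def pvLevels (alternating : Bool) (powers : List Int) : Nat → List (List (String × Int))
  | 0 => [[]]
  | k+1 => (pvLevels alternating powers k).flatMap (pvStep alternating powers)

def pvWords (alternating : Bool) (powers : List Int) : Nat → List (List (String × Int))
  | 0 => []
  | k+1 => pvWords alternating powers k ++ pvLevels alternating powers (k+1)

theorem extendA_eq (alternating : Bool) (powers : List Int) :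
    ∀ (d : Nat) (w : List (String × Int)) (acc : List (List (String × Int))),
      extendA alternating powers w d acc = acc ++ pvDesc alternating powers d w
  | 0, w, acc => by
      simp only [extendA, pvDesc]; split <;> simp
  | d+1, w, acc => by
      rw [extendA, pvDesc,
          PySem.List.foldl_congr_mem _ _
            (fun ws gen => ws ++ powers.flatMap
              (fun power => pvDesc alternating powers d (w ++ [(gen, power)]))) _
            (fun acc' gen _ => by
              rw [PySem.List.foldl_congr_mem _ _
                    (fun ws power => ws ++ pvDesc alternating powers d (w ++ [(gen, power)])) _
                    (fun acc'' power _ => extendA_eq alternating powers d _ acc''),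
                  PySem.List.foldl_append_eq_flatMap]),
          PySem.List.foldl_append_eq_flatMap]

theorem step_nonempty (alternating : Bool) (powers : List Int) (w : List (String × Int)) :
    ∀ v ∈ pvStep alternating powers w, v ≠ [] := by
  intro v hv
  simp only [pvStep, List.mem_flatMap, List.mem_map] at hv
  obtain ⟨g, _, p, _, rfl⟩ := hv
  simp

theorem desc_succ (alternating : Bool) (powers : List Int) (d : Nat) (w : List (String × Int)) :
    pvDesc alternating powers (d+1) w
      = (pvStep alternating powers w).flatMap (pvDesc alternating powers d) := by
  simp [pvDesc, pvStep, List.flatMap_assoc, List.flatMap_map]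

theorem flatMap_desc (alternating : Bool) (powers : List Int) :
    ∀ (d : Nat) (l : List (List (String × Int))), (∀ w ∈ l, w ≠ []) →
      l.flatMap (pvDesc alternating powers d) = pvIter alternating powers d l := by
  intro d
  induction d with
  | zero =>
      intro l hl
      show _ = l
      rw [List.flatMap_congr (g := fun w => [w])
            (by intro w hw; simp [pvDesc, List.isEmpty_iff, hl w hw])]
      simp
  | succ d ih =>
      intro l hl
      calc l.flatMap (pvDesc alternating powers (d+1))
          = l.flatMap (fun w => (pvStep alternating powers w).flatMap
              (pvDesc alternating powers d)) :=
            List.flatMap_congr (fun w _ => desc_succ alternating powers d w)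
        _ = (l.flatMap (pvStep alternating powers)).flatMap
              (pvDesc alternating powers d) := (List.flatMap_assoc ..).symm
        _ = pvIter alternating powers d (l.flatMap (pvStep alternating powers)) := by
            refine ih _ ?_
            intro v hv
            simp only [List.mem_flatMap] at hv
            obtain ⟨w, _, hvw⟩ := hv
            exact step_nonempty alternating powers w v hvw
        _ = pvIter alternating powers (d+1) l := rfl

theorem pvIter_levels (alternating : Bool) (powers : List Int) :
    ∀ (d k : Nat), pvIter alternating powers d (pvLevels alternating powers k)
      = pvLevels alternating powers (k + d) := by
  intro d
  induction d with
  | zero => intro k; rfl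
  | succ d ih =>
      intro k
      have h : pvIter alternating powers (d+1) (pvLevels alternating powers k)
          = pvIter alternating powers d (pvLevels alternating powers (k+1)) := rfl
      rw [h, ih]
      congr 1
      omega

-- A's per-depth contribution with fuel d equals B's frontier at level d+1
theorem seeds_eq (alternating : Bool) (powers : List Int) (d : Nat) :
    (["a", "b"].flatMap (fun gen => powers.flatMap
        (fun power => pvDesc alternating powers d [(gen, power)])))
      = pvLevels alternating powers (d+1) := by
  have h1 : (pvStep alternating powers []).flatMap (pvDesc alternating powers d)
      = ["a", "b"].flatMap (fun gen => powers.flatMap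
          (fun power => pvDesc alternating powers d [(gen, power)])) := by
    simp [pvStep, pvGens, List.flatMap_map]
  have h2 : pvStep alternating powers [] = pvLevels alternating powers 1 := by
    show _ = pvLevels alternating powers (0+1)
    rw [pvLevels, pvLevels]
    simp
  rw [← h1, flatMap_desc alternating powers d _ (step_nonempty alternating powers []), h2,
      pvIter_levels]
  congr 1
  omega

-- one iteration of A's outer loop appends one whole level (both start_gen loops unrolled)
theorem Abody_eq (alternating : Bool) (powers : List Int)
    (acc : List (List (String × Int))) (d : Nat) :
    powers.foldl
      (fun words start_power => extendA alternating powers [("b", start_power)] d words)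
      (powers.foldl
        (fun words start_power => extendA alternating powers [("a", start_power)] d words)
        acc)
      = acc ++ pvLevels alternating powers (d+1) := by
  rw [PySem.List.foldl_congr_mem _ _
        (fun words power => words ++ pvDesc alternating powers d [("a", power)]) _
        (fun acc' power _ => extendA_eq alternating powers d _ acc'),
      PySem.List.foldl_append_eq_flatMap,
      PySem.List.foldl_congr_mem _ _
        (fun words power => words ++ pvDesc alternating powers d [("b", power)]) _
        (fun acc' power _ => extendA_eq alternating powers d _ acc'),
      PySem.List.foldl_append_eq_flatMap, List.append_assoc]
  rw [← seeds_eq alternating powers d]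
  simp

-- A's outer fold over depths 1..m produces pvWords m
theorem Afold_eq (alternating : Bool) (powers : List Int) (m : Nat) :
    (PySem.List.pyRange 1 ((m : Int) + 1) 1).foldl
      (fun words depth =>
        ["a", "b"].foldl
          (fun words start_gen =>
            powers.foldl
              (fun words start_power =>
                extendA alternating powers [(start_gen, start_power)] (depth - 1).toNat words)
              words)
          words)
      []
      = pvWords alternating powers m := by
  induction m with
  | zero =>
      rw [PySem.List.pyRange_one_eq_nil (by omega)]
      rfl
  | succ m ih =>
      rw [show ((m + 1 : Nat) : Int) + 1 = ((m : Int) + 1) + 1 by push_cast; ring,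
          PySem.List.pyRange_one_succ_right (by omega),
          List.foldl_append, ih]
      simp only [List.foldl_cons, List.foldl_nil]
      rw [show (((m : Int) + 1) - 1).toNat = m by omega, Abody_eq]
      rfl

-- B's inner two loops compute one frontier step
theorem Bstep_eq (alternating : Bool) (powers : List Int) (level : List (List (String × Int))) :
    level.foldl
      (fun nl word =>
        (pvGens alternating word).foldl
          (fun nl gen =>
            powers.foldl (fun nl power => nl ++ [word ++ [(gen, power)]]) nl)
          nl)
      []
      = level.flatMap (pvStep alternating powers) := by
  rw [PySem.List.foldl_congr_mem _ _
        (fun nl word => nl ++ pvStep alternating powers word) _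
        (fun acc word _ => by
          rw [PySem.List.foldl_congr_mem _ _
                (fun nl gen => nl ++ powers.map (fun power => word ++ [(gen, power)])) _
                (fun acc' gen _ => PySem.List.foldl_append_singleton_eq_map _ _ _),
              PySem.List.foldl_append_eq_flatMap]
          rfl),
      PySem.List.foldl_append_eq_flatMap]
  rfl

-- B's outer fold over m iterations
theorem Bfold_eq (alternating : Bool) (powers : List Int) (m : Nat) :
    (PySem.List.pyRange 0 (m : Int) 1).foldl
      (fun (st : List (List (String × Int)) × List (List (String × Int))) _ =>
        let new_level := st.2.foldl
          (fun nl word =>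
            (pvGens alternating word).foldl
              (fun nl gen =>
                powers.foldl (fun nl power => nl ++ [word ++ [(gen, power)]]) nl)
              nl)
          []
        (st.1 ++ new_level, new_level))
      ([], [[]])
      = (pvWords alternating powers m, pvLevels alternating powers m) := by
  induction m with
  | zero =>
      rw [PySem.List.pyRange_one_eq_nil (by omega)]
      rfl
  | succ m ih =>
      rw [show ((m + 1 : Nat) : Int) = (m : Int) + 1 by push_cast; ring,
          PySem.List.pyRange_one_succ_right (by omega),
          List.foldl_append, ih]
      simp only [List.foldl_cons, List.foldl_nil]
      rw [Bstep_eq]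
      rfl

theorem main_eq (alternating : Bool) (powers : List Int) (M : Int) :
    (PySem.List.pyRange 1 (M + 1) 1).foldl
      (fun words depth =>
        ["a", "b"].foldl
          (fun words start_gen =>
            powers.foldl
              (fun words start_power =>
                extendA alternating powers [(start_gen, start_power)] (depth - 1).toNat words)
              words)
          words)
      []
      = ((PySem.List.pyRange 0 M 1).foldl
          (fun (st : List (List (String × Int)) × List (List (String × Int))) _ =>
            let new_level := st.2.foldl
              (fun nl word =>
                (pvGens alternating word).foldl
                  (fun nl gen =>
                    powers.foldl (fun nl power => nl ++ [word ++ [(gen, power)]]) nl)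
                  nl)
              []
            (st.1 ++ new_level, new_level))
          ([], [[]])).1 := by
  by_cases h : M ≤ 0
  · rw [PySem.List.pyRange_one_eq_nil (by omega), PySem.List.pyRange_one_eq_nil (by omega)]
    rfl
  · have hM : M = (M.toNat : Int) := by omega
    rw [hM, Afold_eq, Bfold_eq]

-- ===== VERDICT (by name: the statement is the Claim_ definition above) =====
theorem generate_words_spec : Claim_equal_generate_words := by
  intro n max_depth alternating _
  unfold Spec_generate_words generate_words generate_words_alt
  exact main_eq alternating _ max_depth
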